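-- pv_equiv track=rewrite | github.com/Ago-aka-pasta-boy/Thymio-in-Paris | Global_navigation/global_path.py | obtain_list_sides
-- ===== SOURCE A (Python) =====
-- def obtain_list_sides(list_vertices):
--     """
--     Given the list of obstacle vertices sorted by obstacle,
--     this function returns the list of obstacle sides sorted by obstacle.
--
--     Inputs: list_vertices as in find_all_paths
--
--     Outputs: list_sides = [[obstacle_1.sides], [obstacle_2.sides], ...]
--     where obstacle_k.sides = [(name_vertex1, name_vertex2), ..., (name_vertexV, name_vertex1)]
--     """
--
--
--     #step 1: obtain the number of sides of each obstacle
--     length_obstacles = []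
--     for obstacle in list_vertices:
--         length_obstacles.append(len(obstacle))
--
--     #step 2: convert indexing of vertices from [0][0],[0][1],... into 1,2,3,...,N
--     #(0 and N+1 are start and goal respectively)
--
--     #then enter every tuple (side.vertex1, side.vertex2) into sides_obstacle
--     #then enter sides_obstacle into list_sides
--     list_sides = []
--     for obstacle in range(len(list_vertices)):
--         sides_obstacle = []                             #list of sides of current obstacle
--
--         shift = sum(length_obstacles[0:obstacle]) + 1   #to convert indexing
--         nb_sides = length_obstacles[obstacle]
--         for vertex in range(nb_sides):
--             side = (shift + vertex,\
--                     shift + ((vertex+1) % nb_sides))    #use of % to count 1,2,1 instead of 1,2,3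
--             sides_obstacle.append(side)
--
--         list_sides.append(sides_obstacle)               #total list of sides, grouped by obstacle
--
--     return list_sides
-- ===== SOURCE B (Python) =====
-- def obtain_list_sides(list_vertices):
--     # One global pass renumbers all vertices 1..N, grouped by obstacle;
--     # then each obstacle's sides are the group zipped with its left-rotation.
--     names = []
--     counter = 1
--     for obstacle in list_vertices:
--         group = []
--         for _ in obstacle:
--             group.append(counter)
--             counter += 1
--         names.append(group)
--     return [list(zip(g, g[1:] + g[:1])) for g in names]
-- ===== Notes on version B (the rewrite author's own statement) =====
-- stated objective: alternative
-- what changed: B replaces A's index-arithmetic (prefix-sum shift + (vertex+1) % nb) with one global renumbering pass keeping a running counter, then derives each obstacle's sides by zipping its name list with its own left-rotation.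
import Mathlib
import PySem

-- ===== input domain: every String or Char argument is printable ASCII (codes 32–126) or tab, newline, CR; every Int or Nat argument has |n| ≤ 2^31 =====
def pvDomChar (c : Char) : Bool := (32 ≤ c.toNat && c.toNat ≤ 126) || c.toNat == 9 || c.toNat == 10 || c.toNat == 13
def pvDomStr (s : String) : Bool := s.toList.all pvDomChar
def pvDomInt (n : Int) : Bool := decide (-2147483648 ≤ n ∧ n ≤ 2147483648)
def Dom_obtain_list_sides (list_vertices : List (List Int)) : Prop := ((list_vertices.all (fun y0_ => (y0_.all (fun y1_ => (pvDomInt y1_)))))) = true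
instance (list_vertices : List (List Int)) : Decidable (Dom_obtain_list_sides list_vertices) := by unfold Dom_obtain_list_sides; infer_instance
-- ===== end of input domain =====

-- B renumbers all vertices in one global counter pass and derives each obstacle's
-- sides by zipping its name list with its left-rotation, instead of A's
-- prefix-sum shift + (vertex+1) % nb index arithmetic (objective: alternative).

-- ===== PORT A =====
def obtain_list_sides (list_vertices : List (List Int)) : List (List (Int × Int)) :=
  -- step 1: lengths of the obstacles
  let length_obstacles : List Int :=
    list_vertices.foldl (fun acc obstacle => acc ++ [(obstacle.length : Int)]) []
  -- step 2: for each obstacle index, build the sides with shift + modulus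
  (PySem.List.pyRange 0 (list_vertices.length : Int) 1).foldl
    (fun list_sides obstacle =>
      let shift : Int :=
        (PySem.List.slice length_obstacles (some 0) (some obstacle)).sum + 1
      let nb_sides : Int := PySem.List.pyGetD length_obstacles obstacle 0  -- index always in range
      let sides_obstacle :=
        (PySem.List.pyRange 0 nb_sides 1).foldl
          (fun acc vertex =>
            acc ++ [(shift + vertex, shift + PySem.Int.mod (vertex + 1) nb_sides)]) []
      list_sides ++ [sides_obstacle]) []

-- ===== PORT B =====
def obtain_list_sides_alt (list_vertices : List (List Int)) : List (List (Int × Int)) :=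
  let st :=
    list_vertices.foldl
      (fun (st : List (List Int) × Int) obstacle =>
        let p := obstacle.foldl (fun (p : List Int × Int) _ => (p.1 ++ [p.2], p.2 + 1)) ([], st.2)
        (st.1 ++ [p.1], p.2))
      ([], 1)
  st.1.map (fun g => g.zip (g.drop 1 ++ g.take 1))   -- zip(g, g[1:] + g[:1])

-- ===== PRECONDITION & SPEC =====
def Spec_obtain_list_sides (list_vertices : List (List Int)) (out : List (List (Int × Int))) : Prop := out = obtain_list_sides_alt list_vertices
instance (list_vertices : List (List Int)) (out : List (List (Int × Int))) : Decidable (Spec_obtain_list_sides list_vertices out) := by unfold Spec_obtain_list_sides; infer_instance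

-- ===== CLAIM (what is proved, stated in full; the proofs are below) =====
def Claim_equal_obtain_list_sides : Prop := ∀ (list_vertices : List (List Int)), Dom_obtain_list_sides list_vertices → Spec_obtain_list_sides list_vertices (obtain_list_sides list_vertices)

-- ===== LEMMAS AND PROOFS =====

-- common normal form: sides of one obstacle of n vertices starting at global name `shift`
def pvBlock (n : Nat) (shift : Int) : List (Int × Int) :=
  (List.range n).map (fun (v : Nat) => (shift + (v : Int), shift + PySem.Int.mod ((v : Int) + 1) (n : Int)))

def pvS : List Nat → Int → List (List (Int × Int))
  | [], _ => []
  | n :: rest, shift => pvBlock n shift :: pvS rest (shift + n)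

-- A's outer loop as a map over indices equals pvS
lemma pvA_gen (L : List Nat) (s : Int) :
    (List.range L.length).map
      (fun i => pvBlock (L.getD i 0) (s + ((L.take i).sum : Int))) = pvS L s := by
  induction L generalizing s with
  | nil => rfl
  | cons n rest ih =>
    rw [show pvS (n :: rest) s = pvBlock n s :: pvS rest (s + n) from rfl]
    rw [List.length_cons, List.range_succ_eq_map, List.map_cons, List.map_map]
    refine congrArg₂ List.cons ?_ ?_
    · simp
    · rw [← ih (s + n)]
      apply List.map_congr_left
      intro i _
      simp only [Function.comp_apply, List.getD_cons_succ, List.take_succ_cons, List.sum_cons]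
      congr 1
      push_cast
      ring

lemma castGetD (L : List Nat) (i : Nat) :
    (L.map (fun (n : Nat) => (n : Int))).getD i 0 = ((L.getD i 0 : Nat) : Int) := by
  induction L generalizing i with
  | nil => rfl
  | cons a t ih =>
    cases i with
    | zero => rfl
    | succ j => simpa only [List.map_cons, List.getD_cons_succ] using ih j

lemma castSum (L : List Nat) :
    (L.map (fun (n : Nat) => (n : Int))).sum = ((L.sum : Nat) : Int) := by
  induction L with
  | nil => rfl
  | cons a t ih => simp only [List.map_cons, List.sum_cons, Nat.cast_add, ih]

lemma blockLemma (m : Nat) (shift : Int) :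
    (PySem.List.pyRange 0 (m : Int) 1).map
      (fun v => (shift + v, shift + PySem.Int.mod (v + 1) (m : Int))) = pvBlock m shift := by
  rw [PySem.List.pyRange_one, List.map_map]
  simp [pvBlock]

lemma portA_eq (lv : List (List Int)) :
    obtain_list_sides lv = pvS (lv.map List.length) 1 := by
  unfold obtain_list_sides
  simp only [PySem.List.foldl_append_singleton_eq_map]
  rw [← pvA_gen (lv.map List.length) 1]
  rw [show (fun o => (List.length o : Int)) = (fun (n : Nat) => (n : Int)) ∘ List.length from rfl,
    ← List.map_map, PySem.List.pyRange_one, List.map_map]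
  simp only [sub_zero, Int.toNat_natCast, List.length_map]
  apply List.map_congr_left
  intro i hi
  simp only [Function.comp_apply, List.nil_append, zero_add]
  rw [PySem.List.pyGetD_natCast, castGetD]
  have hs : PySem.List.slice ((lv.map List.length).map (fun (n : Nat) => (n : Int)))
      (some 0) (some (i : Int))
      = ((lv.map List.length).take i).map (fun (n : Nat) => (n : Int)) := by
    rw [PySem.List.slice_toNat _ le_rfl (Int.natCast_nonneg i)]
    simp [List.map_take]
  rw [hs]
  simp only [castSum, blockLemma]
  congr 1
  ring

-- the renumbered-name groups B maintains: consecutive integers starting at c, grouped by obstacle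
def pvGroups : List (List Int) → Int → List (List Int)
  | [], _ => []
  | ob :: rest, c => (List.range ob.length).map (fun (k : Nat) => c + (k : Int)) :: pvGroups rest (c + ob.length)

lemma innerGroup (ob : List Int) (g0 : List Int) (c : Int) :
    ob.foldl (fun (p : List Int × Int) _ => (p.1 ++ [p.2], p.2 + 1)) (g0, c)
      = (g0 ++ (List.range ob.length).map (fun (k : Nat) => c + (k : Int)), c + ob.length) := by
  induction ob generalizing g0 c with
  | nil => simp
  | cons x t ih =>
    rw [List.foldl_cons, ih]
    refine Prod.ext ?_ (by simp; ring)
    simp only [List.length_cons, List.range_succ_eq_map, List.map_cons, List.map_map,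
      List.append_assoc, List.cons_append, List.nil_append, Nat.cast_zero, add_zero]
    refine congrArg (g0 ++ ·) (congrArg (c :: ·) ?_)
    apply List.map_congr_left
    intro k _
    simp only [Function.comp_apply]
    push_cast
    ring

lemma outerGroups (lv : List (List Int)) (acc : List (List Int)) (c : Int) :
    lv.foldl
      (fun (st : List (List Int) × Int) obstacle =>
        let p := obstacle.foldl (fun (p : List Int × Int) _ => (p.1 ++ [p.2], p.2 + 1)) ([], st.2)
        (st.1 ++ [p.1], p.2))
      (acc, c)
      = (acc ++ pvGroups lv c, c + ((lv.map List.length).sum : Nat)) := by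
  have hfun : (fun (st : List (List Int) × Int) (obstacle : List Int) =>
      let p := obstacle.foldl (fun (p : List Int × Int) _ => (p.1 ++ [p.2], p.2 + 1)) ([], st.2)
      (st.1 ++ [p.1], p.2))
      = fun (st : List (List Int) × Int) (obstacle : List Int) =>
        (st.1 ++ [(List.range obstacle.length).map (fun (k : Nat) => st.2 + (k : Int))],
          st.2 + obstacle.length) := by
    funext st ob
    simp [innerGroup]
  rw [hfun]
  induction lv generalizing acc c with
  | nil => simp [pvGroups]
  | cons ob rest ih =>
    rw [List.foldl_cons, ih]
    refine Prod.ext (by simp [pvGroups]) ?_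
    simp
    ring

lemma zipRot (n : Nat) (c : Int) :
    (((List.range n).map (fun (k : Nat) => c + (k : Int))).zip
        (((List.range n).map (fun (k : Nat) => c + (k : Int))).drop 1 ++
          ((List.range n).map (fun (k : Nat) => c + (k : Int))).take 1))
      = pvBlock n c := by
  cases n with
  | zero => rfl
  | succ m =>
    apply List.ext_getElem
    · simp [pvBlock]
    · intro i h1 h2
      have hi : i < m + 1 := by simpa [pvBlock] using h2
      have hmod : PySem.Int.mod ((i : Int) + 1) ((m : Int) + 1)
          = if i < m then (i : Int) + 1 else 0 := by
        rw [PySem.Int.mod_eq_emod_of_pos (by positivity)]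
        split
        · rw [Int.emod_eq_of_lt (by positivity) (by omega)]
        · have : i = m := by omega
          subst this
          simp
      simp only [List.getElem_zip, pvBlock, List.getElem_map, List.getElem_range]
      push_cast
      rw [hmod]
      by_cases hlt : i < m
      · rw [List.getElem_append_left (by simpa using hlt)]
        simp only [List.getElem_drop, List.getElem_map, List.getElem_range, if_pos hlt,
          Prod.mk.injEq, true_and]
        push_cast
        ring
      · have : i = m := by omega
        subst this
        rw [List.getElem_append_right (by simp)]
        simp

lemma groupsToS (lv : List (List Int)) (c : Int) :
    (pvGroups lv c).map (fun g => g.zip (g.drop 1 ++ g.take 1)) = pvS (lv.map List.length) c := by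
  induction lv generalizing c with
  | nil => rfl
  | cons ob rest ih =>
    simp only [pvGroups, List.map_cons, zipRot, List.map_cons]
    rw [ih]
    rfl

lemma portB_eq (lv : List (List Int)) :
    obtain_list_sides_alt lv = pvS (lv.map List.length) 1 := by
  unfold obtain_list_sides_alt
  rw [outerGroups lv [] 1]
  simpa using groupsToS lv 1

-- ===== VERDICT (by name: the statement is the Claim_ definition above) =====
theorem obtain_list_sides_spec : Claim_equal_obtain_list_sides := by
  intro lv _
  unfold Spec_obtain_list_sides
  rw [portA_eq, portB_eq]
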